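-- pv_equiv track=rewrite | github.com/maxf98/cap_options | utils/general_utils.py | find_best_keys
-- ===== SOURCE A (Python) =====
-- def find_best_keys(words_dict, sentence):
--     sentence_words = set(sentence.lower().split())
--     max_match_count = 0
--     best_keys = []
--     for key, word_list in words_dict.items():
--         match_count = len(set(word.lower() for word in word_list) & sentence_words)
--         if match_count > max_match_count:
--             max_match_count = match_count
--             best_keys = [key]
--         elif match_count == max_match_count:
--             best_keys.append(key)
--     return best_keys
-- ===== SOURCE B (Python) =====
-- def find_best_keys(words_dict, sentence):
--     sentence_words = set(sentence.lower().split())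
--     counts = [(key, len({word.lower() for word in word_list} & sentence_words))
--               for key, word_list in words_dict.items()]
--     if not counts:
--         return []
--     best = max(count for _, count in counts)
--     return [key for key, count in counts if count == best]
-- ===== Notes on version B (the rewrite author's own statement) =====
-- stated objective: simpler
-- what changed: Replaced the running-max-with-tie-reset accumulator loop by a table of per-key match counts built once, followed by a separate max and an order-preserving filter of the keys attaining it.
import Mathlib
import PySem

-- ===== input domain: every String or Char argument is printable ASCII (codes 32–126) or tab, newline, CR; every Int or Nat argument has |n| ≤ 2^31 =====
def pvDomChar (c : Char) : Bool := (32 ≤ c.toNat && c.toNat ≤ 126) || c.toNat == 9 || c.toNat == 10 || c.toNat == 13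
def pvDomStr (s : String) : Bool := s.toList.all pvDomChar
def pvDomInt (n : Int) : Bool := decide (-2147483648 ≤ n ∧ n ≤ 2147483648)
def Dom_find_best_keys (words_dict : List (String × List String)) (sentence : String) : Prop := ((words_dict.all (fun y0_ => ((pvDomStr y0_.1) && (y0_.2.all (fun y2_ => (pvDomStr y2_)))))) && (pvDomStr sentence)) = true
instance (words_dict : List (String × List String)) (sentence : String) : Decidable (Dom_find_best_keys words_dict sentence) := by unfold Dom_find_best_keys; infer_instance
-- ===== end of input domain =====

-- B replaces A's running-max/tie-reset loop by a counts table, a max, and a filter (objective: simpler).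

-- ===== PORT A =====
-- match_count = len(set(word.lower() for word in word_list) & sentence_words)
def pvCnt (sw : PySem.Set String) (word_list : List String) : Int :=
  PySem.Set.len (PySem.Set.inter (PySem.Set.ofList (word_list.map PySem.Str.lower)) sw)

def find_best_keys (words_dict : List (String × List String)) (sentence : String) : List String :=
  let sentence_words : PySem.Set String := PySem.Set.ofList (PySem.Str.split₀ (PySem.Str.lower sentence))
  (words_dict.foldl (fun (st : Int × List String) kv =>
      let match_count := pvCnt sentence_words kv.2
      if match_count > st.1 then (match_count, [kv.1])
      else if match_count = st.1 then (st.1, st.2 ++ [kv.1])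
      else st)
    ((0 : Int), ([] : List String))).2

-- ===== PORT B =====
def find_best_keys_alt (words_dict : List (String × List String)) (sentence : String) : List String :=
  let sentence_words : PySem.Set String := PySem.Set.ofList (PySem.Str.split₀ (PySem.Str.lower sentence))
  let counts := words_dict.map (fun kv => (kv.1, pvCnt sentence_words kv.2))
  if counts = [] then []
  else
    let best := (PySem.List.max? (counts.map Prod.snd) (fun x => x)).getD 0
    (counts.filter (fun kc => decide (kc.2 = best))).map Prod.fst

-- ===== PRECONDITION & SPEC =====
def Spec_find_best_keys (words_dict : List (String × List String)) (sentence : String) (out : List String) : Prop := out = find_best_keys_alt words_dict sentence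
instance (words_dict : List (String × List String)) (sentence : String) (out : List String) : Decidable (Spec_find_best_keys words_dict sentence out) := by unfold Spec_find_best_keys; infer_instance

-- ===== CLAIM (what is proved, stated in full; the proofs are below) =====
def Claim_equal_find_best_keys : Prop := ∀ (words_dict : List (String × List String)) (sentence : String), Dom_find_best_keys words_dict sentence → Spec_find_best_keys words_dict sentence (find_best_keys words_dict sentence)

-- ===== LEMMAS AND PROOFS =====

-- running max over the counts of a list
def pvM (sw : PySem.Set String) (l : List (String × List String)) (m : Int) : Int :=
  l.foldl (fun a kv => max a (pvCnt sw kv.2)) m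

lemma pvM_ge (sw : PySem.Set String) (l : List (String × List String)) (m : Int) :
    m ≤ pvM sw l m := by
  induction l generalizing m with
  | nil => simp [pvM]
  | cons kv t ih =>
      calc m ≤ max m (pvCnt sw kv.2) := le_max_left _ _
        _ ≤ pvM sw t (max m (pvCnt sw kv.2)) := ih _
        _ = pvM sw (kv :: t) m := rfl

-- characterisation of A's accumulator loop
lemma foldA_spec (sw : PySem.Set String) (l : List (String × List String)) (m : Int) (keys : List String) :
    l.foldl (fun (st : Int × List String) kv =>
      let match_count := pvCnt sw kv.2
      if match_count > st.1 then (match_count, [kv.1])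
      else if match_count = st.1 then (st.1, st.2 ++ [kv.1])
      else st) (m, keys)
    = (pvM sw l m,
       (if pvM sw l m = m then keys else []) ++ (l.filter (fun kv => decide (pvCnt sw kv.2 = pvM sw l m))).map Prod.fst) := by
  induction l generalizing m keys with
  | nil => simp [pvM]
  | cons kv t ih =>
      by_cases hgt : pvCnt sw kv.2 > m
      · have hmax : max m (pvCnt sw kv.2) = pvCnt sw kv.2 := max_eq_right (le_of_lt hgt)
        have hM : pvM sw (kv :: t) m = pvM sw t (pvCnt sw kv.2) := by simp [pvM, hmax]
        have hge : pvCnt sw kv.2 ≤ pvM sw t (pvCnt sw kv.2) := pvM_ge sw t _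
        have hne : ¬ (pvM sw t (pvCnt sw kv.2) = m) := by omega
        simp only [List.foldl_cons, if_pos hgt]
        rw [ih, hM, if_neg hne, List.filter_cons]
        by_cases heq : pvCnt sw kv.2 = pvM sw t (pvCnt sw kv.2)
        · rw [if_pos heq.symm, if_pos (by simpa using heq)]
          simp
        · rw [if_neg (fun h => heq h.symm), if_neg (by simpa using heq)]
      · have hmax : max m (pvCnt sw kv.2) = m := max_eq_left (le_of_not_gt hgt)
        have hM : pvM sw (kv :: t) m = pvM sw t m := by simp [pvM, hmax]
        have hgem : m ≤ pvM sw t m := pvM_ge sw t m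
        by_cases heq : pvCnt sw kv.2 = m
        · simp only [List.foldl_cons, if_neg (by omega : ¬ pvCnt sw kv.2 > m), if_pos heq]
          rw [ih, hM, List.filter_cons]
          by_cases hMm : pvM sw t m = m
          · have hc : decide (pvCnt sw kv.2 = pvM sw t m) = true := by
              simp only [decide_eq_true_eq]; omega
            rw [if_pos hMm, if_pos hMm, if_pos hc]
            simp
          · have hc : ¬ (decide (pvCnt sw kv.2 = pvM sw t m) = true) := by
              simp only [decide_eq_true_eq]; omega
            rw [if_neg hMm, if_neg hMm, if_neg hc]
        · have hlt : pvCnt sw kv.2 < m := lt_of_le_of_ne (le_of_not_gt hgt) heq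
          simp only [List.foldl_cons, if_neg (by omega : ¬ pvCnt sw kv.2 > m), if_neg heq]
          have hc : ¬ (decide (pvCnt sw kv.2 = pvM sw t m) = true) := by
            simp only [decide_eq_true_eq]; omega
          rw [ih, hM, List.filter_cons, if_neg hc]

lemma pvCnt_nonneg (sw : PySem.Set String) (wl : List String) : 0 ≤ pvCnt sw wl := by
  simp [pvCnt, PySem.Set.len]

-- ===== VERDICT (by name: the statement is the Claim_ definition above) =====
theorem find_best_keys_spec : Claim_equal_find_best_keys := by
  intro words_dict sentence _
  simp only [Spec_find_best_keys, find_best_keys, find_best_keys_alt]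
  set sw := PySem.Set.ofList (PySem.Str.split₀ (PySem.Str.lower sentence)) with hsw
  rw [foldA_spec]
  cases words_dict with
  | nil => simp [pvM]
  | cons kv t =>
      have h0 : max 0 (pvCnt sw kv.2) = pvCnt sw kv.2 := max_eq_right (pvCnt_nonneg sw kv.2)
      have hmax : (PySem.List.max? ((kv :: t).map (fun x => pvCnt sw x.2)) (fun x => x)) = some (pvM sw (kv :: t) 0) := by
        rw [List.map_cons, PySem.List.max?_id_cons, List.foldl_map]
        simp [pvM, h0]
      have hne : ¬ ((kv :: t).map (fun kv => (kv.1, pvCnt sw kv.2)) = []) := by simp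
      simp only [if_neg hne, List.filter_map, List.map_map, ite_self, List.nil_append,
        Function.comp_def, hmax, Option.getD_some]
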